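-- pv_equiv track=rewrite | github.com/debug-everything/distill | backend/app/core/task_router.py | _trim_history
-- ===== SOURCE A (Python) =====
-- def _trim_history(history: list[dict], budget: int = 4000) -> list[dict]:
--     """Select recent conversation exchanges that fit within a character budget.
--
--     Walks backward through history, including whole Q&A pairs until the budget
--     is exceeded. Always includes at least the most recent exchange.
--     """
--     if not history:
--         return []
--     trimmed: list[dict] = []
--     used = 0
--     for entry in reversed(history):
--         entry_len = len(entry.get("question", "")) + len(entry.get("answer", ""))
--         if trimmed and used + entry_len > budget:
--             break
--         trimmed.append(entry)
--         used += entry_len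
--     trimmed.reverse()
--     return trimmed
-- ===== SOURCE B (Python) =====
-- def _trim_history(history: list[dict], budget: int = 4000) -> list[dict]:
--     """Cumulative suffix sums + binary search for the cut point, then one slice.
--
--     Entry lengths are nonnegative, so the suffix sums (most recent first) are
--     nondecreasing; hence A's greedy break equals the largest k with
--     cum[k-1] <= budget, clamped to k >= 1. Found by bisection, not by a scan.
--     """
--     if not history:
--         return []
--     cum = []
--     total = 0
--     for entry in reversed(history):
--         total += len(entry.get("question", "")) + len(entry.get("answer", ""))
--         cum.append(total)
--     lo, hi = 0, len(cum)  # invariant: cum[:lo] <= budget < cum[hi:]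
--     while lo < hi:
--         mid = (lo + hi) // 2
--         if cum[mid] <= budget:
--             lo = mid + 1
--         else:
--             hi = mid
--     k = max(lo, 1)
--     return history[len(history) - k:]
-- ===== Notes on version B (the rewrite author's own statement) =====
-- stated objective: alternative
-- what changed: B replaces A's greedy backward walk with early break by a threshold computation: it builds the cumulative suffix-sum array of entry lengths once, binary-searches that monotone array for the largest k whose cumulative sum fits the budget (clamped to k>=1), and returns the suffix slice history[len-k:]; correctness rests on lengths being nonnegative, which makes the cumulative sums nondecreasing so the greedy break point equals the global threshold.
import Mathlib
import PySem

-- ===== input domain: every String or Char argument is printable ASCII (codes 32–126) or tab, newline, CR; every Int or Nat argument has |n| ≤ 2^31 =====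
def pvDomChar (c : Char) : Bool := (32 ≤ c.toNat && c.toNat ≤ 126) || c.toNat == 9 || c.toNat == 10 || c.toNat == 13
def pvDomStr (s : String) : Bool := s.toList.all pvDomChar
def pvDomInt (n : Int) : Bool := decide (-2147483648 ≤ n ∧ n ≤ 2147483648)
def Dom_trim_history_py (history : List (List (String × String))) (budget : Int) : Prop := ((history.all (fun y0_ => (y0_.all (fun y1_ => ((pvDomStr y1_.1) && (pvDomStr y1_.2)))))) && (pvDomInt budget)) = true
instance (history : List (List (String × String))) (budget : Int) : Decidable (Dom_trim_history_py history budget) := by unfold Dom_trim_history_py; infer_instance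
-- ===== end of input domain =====

-- B builds the cumulative suffix-sum array once and binary-searches it for the cut point, then slices; same value as A (objective: alternative).

-- ===== PORT A =====
-- len(entry.get("question","")) + len(entry.get("answer","")), shared by both ports
def entryLen (e : List (String × String)) : Int :=
  PySem.Str.len (PySem.Dict.getD ⟨e⟩ "question" "") + PySem.Str.len (PySem.Dict.getD ⟨e⟩ "answer" "")

-- the 'for entry in reversed(history)' loop with the break
def trimLoopA (budget : Int) : List (List (String × String)) → List (List (String × String)) → Int → List (List (String × String))
  | [], trimmed, _ => trimmed
  | e :: rest, trimmed, used =>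
    let l := entryLen e
    if trimmed ≠ [] ∧ used + l > budget then trimmed
    else trimLoopA budget rest (trimmed ++ [e]) (used + l)

def trim_history_py (history : List (List (String × String))) (budget : Int) : List (List (String × String)) :=
  if history = [] then []
  else (trimLoopA budget history.reverse [] 0).reverse

-- ===== PORT B =====
-- the 'for entry in reversed(history): total += …; cum.append(total)' pass
def buildCum : List (List (String × String)) → Int → List Int
  | [], _ => []
  | e :: rest, total => (total + entryLen e) :: buildCum rest (total + entryLen e)

-- the 'while lo < hi' bisection; cum[mid] is always in range in the Python (lo < hi ≤ len), so getD is exact here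
def bsearchLoop (cum : List Int) (budget : Int) (lo hi : Nat) : Nat :=
  if h : lo < hi then
    let mid := (lo + hi) / 2
    if cum.getD mid 0 ≤ budget then bsearchLoop cum budget (mid + 1) hi
    else bsearchLoop cum budget lo mid
  else lo
termination_by hi - lo
decreasing_by all_goals omega

def trim_history_py_alt (history : List (List (String × String))) (budget : Int) : List (List (String × String)) :=
  if history = [] then []
  else
    let cum := buildCum history.reverse 0
    let lo := bsearchLoop cum budget 0 cum.length
    let k := max lo 1
    history.drop (history.length - k)

-- ===== PRECONDITION & SPEC =====
def Spec_trim_history_py (history : List (List (String × String))) (budget : Int) (out : List (List (String × String))) : Prop := out = trim_history_py_alt history budget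
instance (history : List (List (String × String))) (budget : Int) (out : List (List (String × String))) : Decidable (Spec_trim_history_py history budget out) := by unfold Spec_trim_history_py; infer_instance

-- ===== CLAIM (what is proved, stated in full; the proofs are below) =====
def Claim_equal_trim_history_py : Prop := ∀ (history : List (List (String × String))) (budget : Int), Dom_trim_history_py history budget → Spec_trim_history_py history budget (trim_history_py history budget)

-- ===== LEMMAS AND PROOFS =====

-- abstraction of A's loop past the first entry: the fitting prefix of the rest
def twc (budget used : Int) : List (List (String × String)) → List (List (String × String))
  | [] => []
  | e :: rest =>
    if used + entryLen e > budget then []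
    else e :: twc budget (used + entryLen e) rest

theorem entryLen_nonneg (e : List (String × String)) : 0 ≤ entryLen e := by
  unfold entryLen
  have h1 := PySem.Str.len_eq (PySem.Dict.getD ⟨e⟩ "question" "")
  have h2 := PySem.Str.len_eq (PySem.Dict.getD ⟨e⟩ "answer" "")
  omega

theorem trimLoopA_eq_twc (budget : Int) (rest : List (List (String × String))) :
    ∀ trimmed used, trimmed ≠ [] →
      trimLoopA budget rest trimmed used = trimmed ++ twc budget used rest := by
  induction rest with
  | nil => intro trimmed used _; simp [trimLoopA, twc]
  | cons e rest ih =>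
    intro trimmed used h
    simp only [trimLoopA, twc]
    by_cases hb : used + entryLen e > budget
    · simp [h, hb]
    · simp only [h, hb, ne_eq, not_false_eq_true, true_and]
      rw [ih (trimmed ++ [e]) _ (by simp)]
      simp

theorem twc_prefix (budget used : Int) (rest : List (List (String × String))) :
    twc budget used rest <+: rest := by
  induction rest generalizing used with
  | nil => simp [twc]
  | cons e rest ih =>
    simp only [twc]
    split
    · exact List.nil_prefix
    · exact List.cons_prefix_cons.mpr ⟨rfl, ih _⟩

theorem twc_nil_of_gt (budget t : Int) (rest : List (List (String × String))) (h : budget < t) :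
    twc budget t rest = [] := by
  cases rest with
  | nil => rfl
  | cons e r =>
    have := entryLen_nonneg e
    simp only [twc]
    rw [if_pos (by omega)]

theorem buildCum_length (ls : List (List (String × String))) : ∀ t, (buildCum ls t).length = ls.length := by
  induction ls with
  | nil => intro t; rfl
  | cons e r ih => intro t; simp [buildCum, ih]

theorem buildCum_ge (ls : List (List (String × String))) :
    ∀ t x, x ∈ buildCum ls t → t ≤ x := by
  induction ls with
  | nil => intro t x hx; simp [buildCum] at hx
  | cons e r ih =>
    intro t x hx
    have he := entryLen_nonneg e
    simp only [buildCum, List.mem_cons] at hx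
    rcases hx with rfl | hx
    · omega
    · have := ih (t + entryLen e) x hx; omega

-- characterization: the i-th cumulative sum fits the budget iff i is below the twc length
theorem buildCum_char (budget : Int) (ls : List (List (String × String))) :
    ∀ t i, i < ls.length →
      ((buildCum ls t).getD i 0 ≤ budget ↔ i < (twc budget t ls).length) := by
  induction ls with
  | nil => intro t i hi; simp at hi
  | cons e r ih =>
    intro t i hi
    simp only [buildCum, twc]
    by_cases hb : t + entryLen e > budget
    · rw [if_pos hb]
      simp only [List.length_nil, Nat.not_lt_zero, iff_false, not_le]
      cases i with
      | zero => simpa using hb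
      | succ j =>
        simp only [List.getD_cons_succ]
        have hj : j < r.length := by simpa using hi
        have hmem : (buildCum r (t + entryLen e)).getD j 0 ∈ buildCum r (t + entryLen e) := by
          rw [List.getD_eq_getElem _ _ (by rw [buildCum_length]; exact hj)]
          exact List.getElem_mem _
        have := buildCum_ge r (t + entryLen e) _ hmem
        omega
    · rw [if_neg hb]
      cases i with
      | zero => simp; omega
      | succ j =>
        simp only [List.getD_cons_succ, List.length_cons, Nat.add_lt_add_iff_right]
        exact ih (t + entryLen e) j (by simpa using hi)

-- binary-search correctness against any index characterization of the threshold C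
theorem bsearchLoop_eq (cum : List Int) (budget : Int) (C : Nat)
    (hchar : ∀ i < cum.length, (cum.getD i 0 ≤ budget ↔ i < C)) :
    ∀ n lo hi, hi - lo ≤ n → lo ≤ C → C ≤ hi → hi ≤ cum.length →
      bsearchLoop cum budget lo hi = C := by
  intro n
  induction n with
  | zero =>
    intro lo hi h1 h2 h3 h4
    unfold bsearchLoop
    rw [dif_neg (by omega)]
    omega
  | succ m ih =>
    intro lo hi h1 h2 h3 h4
    unfold bsearchLoop
    by_cases hlt : lo < hi
    · rw [dif_pos hlt]
      have hmid : (lo + hi) / 2 < cum.length := by omega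
      by_cases hc : cum.getD ((lo + hi) / 2) 0 ≤ budget
      · rw [if_pos hc]
        have := (hchar _ hmid).mp hc
        exact ih _ _ (by omega) (by omega) h3 h4
      · rw [if_neg hc]
        have : ¬ ((lo + hi) / 2 < C) := fun h => hc ((hchar _ hmid).mpr h)
        exact ih _ _ (by omega) h2 (by omega) (by omega)
    · rw [dif_neg hlt]; omega

theorem drop_reverse_of_prefix {T rest : List (List (String × String))} (h : T <+: rest) :
    rest.reverse.drop (rest.length - T.length) = T.reverse := by
  obtain ⟨s, rfl⟩ := h
  rw [List.reverse_append, List.drop_append_of_le_length (by simp)]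
  simp

-- ===== VERDICT (by name: the statement is the Claim_ definition above) =====
theorem trim_history_py_spec : Claim_equal_trim_history_py := by
  intro history budget _
  unfold Spec_trim_history_py trim_history_py trim_history_py_alt
  rcases h : history.reverse with _ | ⟨e0, rest⟩
  · have : history = [] := by simpa using congrArg List.reverse h
    simp [this]
  · have hh : history = rest.reverse ++ [e0] := by
      have := congrArg List.reverse h
      simpa using this
    have hne : history ≠ [] := by simp [hh]
    simp only [hne, if_false]
    -- A side
    have hA : trimLoopA budget (e0 :: rest) [] 0
        = [e0] ++ twc budget (entryLen e0) rest := by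
      simp only [trimLoopA, List.nil_append]
      rw [if_neg (by simp), trimLoopA_eq_twc budget rest [e0] (0 + entryLen e0) (by simp)]
      simp
    set T := twc budget (entryLen e0) rest with hT
    -- B side: bsearchLoop finds C := |twc budget 0 (e0::rest)|, and max C 1 = 1 + |T|
    have hchar := buildCum_char budget (e0 :: rest)
    set C := (twc budget 0 (e0 :: rest)).length with hC
    have hCle : C ≤ (e0 :: rest).length := (twc_prefix budget 0 (e0 :: rest)).length_le
    have hbs : bsearchLoop (buildCum (e0 :: rest) 0) budget 0 (buildCum (e0 :: rest) 0).length = C := by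
      apply bsearchLoop_eq _ _ C
        (fun i hi => hchar 0 i (by rwa [buildCum_length] at hi))
        (buildCum (e0 :: rest) 0).length _ _ (le_refl _) (Nat.zero_le _)
        (by rw [buildCum_length]; exact hCle) (le_refl _)
    have hk : max C 1 = 1 + T.length := by
      by_cases hb : 0 + entryLen e0 > budget
      · have hC0 : C = 0 := by rw [hC]; simp only [twc]; rw [if_pos hb]; rfl
        have hT0 : T = [] := by
          rw [hT]; exact twc_nil_of_gt _ _ _ (by omega)
        rw [hC0, hT0]; rfl
      · have hC1 : C = 1 + T.length := by
          rw [hC]; simp only [twc]; rw [if_neg hb, zero_add, ← hT]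
          simp only [List.length_cons]; omega
        rw [hC1]; omega
    rw [hA, hbs, hk, hh]
    have hlen : T.length ≤ rest.length := (twc_prefix _ _ _).length_le
    have hlen2 : (rest.reverse ++ [e0]).length - (1 + T.length) = rest.length - T.length := by
      simp; omega
    rw [hlen2, List.drop_append_of_le_length (by simp)]
    rw [hT, drop_reverse_of_prefix (twc_prefix budget (entryLen e0) rest)]
    simp
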